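-- pv_equiv track=rewrite | github.com/damithkawshan/Image-Downsampling-Processor | chill.py | getValToAc
-- ===== SOURCE A (Python) =====
-- def getValToAc(x):
--     num = '{:016b}'.format(x)
--     acommand = ''
--     zeros = 0
--     ones = False
--     for i in range(0,16):
--         c = num[i]
--         if c == '1':
--             if zeros and ones: acommand = acommand + 'shl ' + str(zeros) + '\n'
--             acommand = acommand + 'add zr 1\n'
--             zeros = 0
--             if i == 15: ones = False
--             else: ones = True
--         zeros += 1
--     if zeros and ones: acommand = acommand + 'shl ' + str(zeros) + '\n'
--     return acommand
-- ===== SOURCE B (Python) =====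
-- def getValToAc(x):
--     num = '{:016b}'.format(x)
--     positions = [i for i in range(16) if num[i] == '1']
--     out = ''
--     prev = None
--     for p in positions:
--         if prev is not None:
--             out += 'shl ' + str(p - prev) + '\n'
--         out += 'add zr 1\n'
--         prev = p
--     if positions and positions[-1] != 15:
--         out += 'shl ' + str(16 - positions[-1]) + '\n'
--     return out
-- ===== Notes on version B (the rewrite author's own statement) =====
-- stated objective: alternative
-- what changed: B first extracts the list of set-bit positions from the fixed-width formatted string and emits the shl/add commands from gaps between consecutive positions (plus a trailing shl computed from the last position), instead of A's single char-by-char scan with a zeros counter and a ones flag.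
import Mathlib
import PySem

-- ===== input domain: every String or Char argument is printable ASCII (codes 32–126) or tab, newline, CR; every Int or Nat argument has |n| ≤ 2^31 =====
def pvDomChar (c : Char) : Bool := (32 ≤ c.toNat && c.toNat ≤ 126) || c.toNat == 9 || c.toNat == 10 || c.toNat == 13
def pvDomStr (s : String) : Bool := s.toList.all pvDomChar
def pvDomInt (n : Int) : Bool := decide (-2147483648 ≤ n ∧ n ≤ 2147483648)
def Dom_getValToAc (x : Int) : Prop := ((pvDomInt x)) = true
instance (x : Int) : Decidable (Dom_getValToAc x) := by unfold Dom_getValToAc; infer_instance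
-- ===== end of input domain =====

-- B derives the list of set-bit positions from the formatted string and emits shl/add from
-- consecutive-position gaps, instead of A's per-character scan with zeros/ones counters;
-- objective: alternative decomposition (same cost), exact same return value.

-- ===== PORT A =====

-- '{:016b}'.format(x): binary of |x|, '-' sign for negatives, zero-padded to total width 16
-- (padding goes after the sign). Exact for every Int; result always has length ≥ 16.
def fmt016b (x : Int) : List Char :=
  if x < 0 then
    let b := Nat.toDigits 2 (-x).toNat
    '-' :: (List.replicate (15 - b.length) '0' ++ b)
  else
    let b := Nat.toDigits 2 x.toNat
    List.replicate (16 - b.length) '0' ++ b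

-- one iteration of A's 'for i in range(0,16)' body; num[i] via getD is exact because
-- fmt016b always yields at least 16 characters, so the index is always in range.
def stepA (num : List Char) (st : String × Nat × Bool) (i : Nat) : String × Nat × Bool :=
  let c := num.getD i ' '
  match st with
  | (acc, zeros, ones) =>
    if c = '1' then
      let acc1 := if zeros ≠ 0 ∧ ones = true then acc ++ "shl " ++ toString zeros ++ "\n" else acc
      (acc1 ++ "add zr 1\n", 0 + 1, if i = 15 then false else true)
    else
      (acc, zeros + 1, ones)

def getValToAc (x : Int) : String :=
  let num := fmt016b x
  let st := (List.range 16).foldl (stepA num) ("", 0, false)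
  match st with
  | (acc, zeros, ones) =>
    if zeros ≠ 0 ∧ ones = true then acc ++ "shl " ++ toString zeros ++ "\n" else acc

-- ===== PORT B =====

-- one iteration of B's 'for p in positions' body (prev is None ↦ none)
def stepB (st : String × Option Nat) (p : Nat) : String × Option Nat :=
  match st with
  | (out, none) => (out ++ "add zr 1\n", some p)
  | (out, some q) => (out ++ "shl " ++ toString (p - q) ++ "\n" ++ "add zr 1\n", some p)

def getValToAc_alt (x : Int) : String :=
  let num := fmt016b x
  let positions := (List.range 16).filter (fun i => num.getD i ' ' = '1')
  let st := positions.foldl stepB ("", none)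
  match positions.getLast? with
  | some l => if l ≠ 15 then st.1 ++ "shl " ++ toString (16 - l) ++ "\n" else st.1
  | none => st.1

-- ===== PRECONDITION & SPEC =====
def Spec_getValToAc (x : Int) (out : String) : Prop := out = getValToAc_alt x
instance (x : Int) (out : String) : Decidable (Spec_getValToAc x out) := by unfold Spec_getValToAc; infer_instance

-- ===== CLAIM (what is proved, stated in full; the proofs are below) =====
def Claim_equal_getValToAc : Prop := ∀ (x : Int), Dom_getValToAc x → Spec_getValToAc x (getValToAc x)

-- ===== LEMMAS AND PROOFS =====

-- positions of '1' among the first n indices, and B's loop state over them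
def posL (num : List Char) (n : Nat) : List Nat :=
  (List.range n).filter (fun i => num.getD i ' ' = '1')

def stB (num : List Char) (n : Nat) : String × Option Nat :=
  (posL num n).foldl stepB ("", none)

-- (stepB st n).2 is always some n
lemma stepB_snd (n : Nat) (st : String × Option Nat) : (stepB st n).2 = some n := by
  obtain ⟨o, p⟩ := st; cases p <;> rfl

-- the 'if i == 15' flag A sets equals B's comparison of the last position with 15
lemma ite15 (n : Nat) : (if n = 15 then false else true) = decide (n ≠ 15) := by
  by_cases h : n = 15 <;> simp [h]

-- the loop invariant tying A's (acc, zeros, ones) state after n iterations to B's state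
lemma loop_inv (num : List Char) (n : Nat) (hn : n ≤ 16) :
    ((List.range n).foldl (stepA num) ("", 0, false)) =
      (match (stB num n).2 with
       | none => ("", n, false)
       | some l => ((stB num n).1, n - l, decide (l ≠ 15)))
    ∧ (stB num n).2 = (posL num n).getLast?
    ∧ (∀ l, (stB num n).2 = some l → l < n)
    ∧ ((stB num n).2 = none → (stB num n).1 = "") := by
  induction n with
  | zero => simp [stB, posL]
  | succ n ih =>
    obtain ⟨ih1, ih2, ih3, ih4⟩ := ih (by omega)
    have hrange : List.range (n + 1) = List.range n ++ [n] := List.range_succ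
    by_cases hc : num.getD n ' ' = '1'
    · -- num[n] = '1': positions gain n, both loops take their '1'/append branch
      have hc' : num[n]?.getD ' ' = '1' := by simpa [List.getD] using hc
      have hpos : posL num (n + 1) = posL num n ++ [n] := by
        simp [posL, hrange, List.filter_append, hc']
      have hstB : stB num (n + 1) = stepB (stB num n) n := by
        unfold stB; rw [hpos, List.foldl_append]; rfl
      have hlast : (posL num (n + 1)).getLast? = some n := by rw [hpos]; simp
      refine ⟨?_, ?_, ?_, ?_⟩
      · rw [hrange, List.foldl_append, ih1, hstB]
        cases h2 : (stB num n).2 with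
        | none =>
          have hpair : stB num n = ("", none) := Prod.ext (ih4 h2) h2
          rw [stepB_snd, hpair]
          simp [stepA, stepB, hc', ite15]
        | some l =>
          have hl : l < n := ih3 l h2
          have hpair : stB num n = ((stB num n).1, some l) := Prod.ext rfl h2
          rw [stepB_snd, hpair]
          have hz : n - l ≠ 0 := by omega
          have hl15 : l ≠ 15 := by omega
          simp [stepA, stepB, hc', ite15, hz, hl15]
      · rw [hstB, hlast, stepB_snd]
      · intro l hl
        rw [hstB, stepB_snd] at hl
        cases hl; omega
      · intro h
        rw [hstB, stepB_snd] at h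
        cases h
    · -- num[n] != '1': positions unchanged, A only increments zeros
      have hc' : ¬ num[n]?.getD ' ' = '1' := by simpa [List.getD] using hc
      have hpos : posL num (n + 1) = posL num n := by
        simp [posL, hrange, List.filter_append, hc']
      have hstB : stB num (n + 1) = stB num n := by unfold stB; rw [hpos]
      refine ⟨?_, ?_, ?_, ?_⟩
      · rw [hrange, List.foldl_append, ih1, hstB]
        cases h2 : (stB num n).2 with
        | none => simp [stepA, hc']
        | some l =>
          have hl : l < n := ih3 l h2
          simp [stepA, hc']
          omega
      · rw [hstB, hpos]; exact ih2
      · intro l hl; have := ih3 l (hstB ▸ hl); omega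
      · rw [hstB]; exact ih4

-- ===== VERDICT (by name: the statement is the Claim_ definition above) =====
theorem getValToAc_spec : Claim_equal_getValToAc := by
  intro x _
  unfold Spec_getValToAc getValToAc getValToAc_alt
  obtain ⟨h1, h2, h3, h4⟩ := loop_inv (fmt016b x) 16 (by omega)
  simp only
  rw [show (List.range 16).filter (fun i => decide ((fmt016b x).getD i ' ' = '1')) = posL (fmt016b x) 16 from rfl,
      show (posL (fmt016b x) 16).foldl stepB ("", none) = stB (fmt016b x) 16 from rfl,
      h1, ← h2]
  cases hs : (stB (fmt016b x) 16).2 with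
  | none => simp [h4 hs]
  | some l =>
    have hl : l < 16 := h3 l hs
    by_cases hl15 : l = 15
    · subst hl15; simp
    · have hz : 16 - l ≠ 0 := by omega
      simp [hl15, hz]
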